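-- pv_equiv track=rewrite | github.com/mohammadpmf/helia_akbari | s7 (11 Ordibehesht 1403)/2_tamrin_4.py | esm2
-- ===== SOURCE A (Python) =====
-- def esm2(first, second):
--     while True:
--         if first[0]<second[0]:
--             first = first[1:]
--             if first=="":
--                 return second
--         elif first[0]>second[0]:
--             second = second[1:]
--             if second=="":
--                 return first
--         else:
--             first = first[1:]
--             second = second[1:]
--             if first=="" and second=="":
--                 return "Both strings are empty!"
--             elif first=="":
--                 return second
--             elif second=="":
--                 return first
--         first = first[::-1]
--         second = second[::-1]
-- ===== SOURCE B (Python) =====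
-- def esm2(first, second):
--     # Two-ended windows into the original strings plus a shared orientation flag,
--     # instead of slicing and reversing both strings on every iteration.
--     alo, ahi = 0, len(first)
--     blo, bhi = 0, len(second)
--     rev = False
--
--     def view(s, lo, hi):
--         seg = s[lo:hi]
--         return seg[::-1] if rev else seg
--
--     while True:
--         ca = first[ahi - 1] if rev else first[alo]
--         cb = second[bhi - 1] if rev else second[blo]
--         if ca < cb:
--             if rev:
--                 ahi -= 1
--             else:
--                 alo += 1
--             if alo == ahi:
--                 return view(second, blo, bhi)
--         elif ca > cb:
--             if rev:
--                 bhi -= 1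
--             else:
--                 blo += 1
--             if blo == bhi:
--                 return view(first, alo, ahi)
--         else:
--             if rev:
--                 ahi -= 1
--                 bhi -= 1
--             else:
--                 alo += 1
--                 blo += 1
--             if alo == ahi and blo == bhi:
--                 return "Both strings are empty!"
--             elif alo == ahi:
--                 return view(second, blo, bhi)
--             elif blo == bhi:
--                 return view(first, alo, ahi)
--         rev = not rev
-- ===== Notes on version B (the rewrite author's own statement) =====
-- stated objective: faster
-- what changed: Replaces per-iteration string slicing and reversal of both strings by two-ended window indices into the original strings plus a shared orientation flag, making each loop step O(1).
import Mathlib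
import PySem

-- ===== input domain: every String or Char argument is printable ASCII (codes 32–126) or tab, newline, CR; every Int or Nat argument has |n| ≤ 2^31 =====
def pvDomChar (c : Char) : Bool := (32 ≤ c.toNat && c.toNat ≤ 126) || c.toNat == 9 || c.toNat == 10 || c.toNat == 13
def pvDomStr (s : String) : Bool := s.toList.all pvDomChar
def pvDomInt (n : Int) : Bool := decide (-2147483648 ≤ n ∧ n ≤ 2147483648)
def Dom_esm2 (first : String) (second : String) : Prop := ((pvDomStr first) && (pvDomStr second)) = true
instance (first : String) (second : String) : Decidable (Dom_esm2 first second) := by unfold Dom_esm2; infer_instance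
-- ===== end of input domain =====

-- B replaces per-iteration slicing+reversing by two-ended window indices with a shared
-- orientation flag (objective: faster, O(n+m) vs O((n+m)^2)). Equivalence is about the
-- return value; neither program mutates its arguments.

-- ===== PORT A =====
-- literal transliteration of A's while-loop: drop the front of the smaller string,
-- then reverse both strings, each iteration ('' at entry would be Python's IndexError,
-- excluded by Pre_; the [] fallback branch is unreachable under Pre_).
def esm2Loop (f s : List Char) : String :=
  match f, s with
  | a :: ft, b :: st =>
    if a < b then
      if ft = [] then String.ofList (b :: st)
      else esm2Loop ft.reverse ((b :: st).reverse)
    else if b < a then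
      if st = [] then String.ofList (a :: ft)
      else esm2Loop ((a :: ft).reverse) st.reverse
    else
      if ft = [] ∧ st = [] then "Both strings are empty!"
      else if ft = [] then String.ofList st
      else if st = [] then String.ofList ft
      else esm2Loop ft.reverse st.reverse
  | _, _ => ""
termination_by f.length + s.length
decreasing_by all_goals (simp; try omega)

def esm2 (first : String) (second : String) : String :=
  esm2Loop first.toList second.toList

-- ===== PORT B =====
-- helper 'view' of Source B: the current window [lo,hi) in the current orientation
def pvView (xs : List Char) (lo hi : Nat) (rev : Bool) : List Char :=
  let seg := (xs.drop lo).take (hi - lo)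
  if rev then seg.reverse else seg

-- Source B's while-loop: window indices into the ORIGINAL strings plus a flip bit
def esm2AltLoop (A B : List Char) (alo ahi blo bhi : Nat) (rev : Bool) : String :=
  if alo < ahi ∧ blo < bhi then
    let ca := if rev then A.getD (ahi - 1) ' ' else A.getD alo ' '
    let cb := if rev then B.getD (bhi - 1) ' ' else B.getD blo ' '
    if ca < cb then
      let alo' := if rev then alo else alo + 1
      let ahi' := if rev then ahi - 1 else ahi
      if alo' = ahi' then String.ofList (pvView B blo bhi rev)
      else esm2AltLoop A B alo' ahi' blo bhi (!rev)
    else if cb < ca then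
      let blo' := if rev then blo else blo + 1
      let bhi' := if rev then bhi - 1 else bhi
      if blo' = bhi' then String.ofList (pvView A alo ahi rev)
      else esm2AltLoop A B alo ahi blo' bhi' (!rev)
    else
      let alo' := if rev then alo else alo + 1
      let ahi' := if rev then ahi - 1 else ahi
      let blo' := if rev then blo else blo + 1
      let bhi' := if rev then bhi - 1 else bhi
      if alo' = ahi' ∧ blo' = bhi' then "Both strings are empty!"
      else if alo' = ahi' then String.ofList (pvView B blo' bhi' rev)
      else if blo' = bhi' then String.ofList (pvView A alo' ahi' rev)
      else esm2AltLoop A B alo' ahi' blo' bhi' (!rev)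
  else ""
termination_by (ahi - alo) + (bhi - blo)
decreasing_by all_goals split_ifs <;> omega

def esm2_alt (first : String) (second : String) : String :=
  esm2AltLoop first.toList second.toList 0 first.toList.length 0 second.toList.length false

-- ===== PRECONDITION & SPEC =====
-- Pre_ excludes exactly the inputs where Python A raises IndexError (an empty argument;
-- B raises there too).
def Pre_esm2 (first : String) (second : String) : Prop := first ≠ "" ∧ second ≠ ""
instance (first : String) (second : String) : Decidable (Pre_esm2 first second) := by
  unfold Pre_esm2; infer_instance
def pvWitness_esm2 : String × String := ("a", "b")
def Spec_esm2 (first : String) (second : String) (out : String) : Prop := out = esm2_alt first second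
instance (first : String) (second : String) (out : String) : Decidable (Spec_esm2 first second out) := by unfold Spec_esm2; infer_instance

-- ===== CLAIM (what is proved, stated in full; the proofs are below) =====
def Claim_equal_esm2 : Prop := ∀ (first : String) (second : String), Dom_esm2 first second → Pre_esm2 first second → Spec_esm2 first second (esm2 first second)

-- ===== LEMMAS AND PROOFS =====

theorem pvView_length (xs : List Char) (lo hi : Nat) (rev : Bool)
    (_h1 : lo ≤ hi) (h2 : hi ≤ xs.length) : (pvView xs lo hi rev).length = hi - lo := by
  cases rev <;> simp [pvView] <;> omega

theorem pvView_eq_nil_iff (xs : List Char) (lo hi : Nat) (rev : Bool)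
    (h1 : lo ≤ hi) (h2 : hi ≤ xs.length) : pvView xs lo hi rev = [] ↔ lo = hi := by
  rw [← List.length_eq_zero_iff, pvView_length xs lo hi rev h1 h2]; omega

theorem pvView_reverse (xs : List Char) (lo hi : Nat) (rev : Bool) :
    (pvView xs lo hi rev).reverse = pvView xs lo hi (!rev) := by
  cases rev <;> simp [pvView]

theorem pvView_cons (xs : List Char) (lo hi : Nat) (rev : Bool)
    (h1 : lo < hi) (h2 : hi ≤ xs.length) :
    pvView xs lo hi rev =
      (if rev then xs.getD (hi - 1) ' ' else xs.getD lo ' ') ::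
        pvView xs (if rev then lo else lo + 1) (if rev then hi - 1 else hi) rev := by
  cases rev
  · have hlo : lo < xs.length := by omega
    have hdrop : xs.drop lo = xs[lo] :: xs.drop (lo + 1) := List.drop_eq_getElem_cons hlo
    have hk : hi - lo = (hi - (lo + 1)) + 1 := by omega
    simp only [pvView, if_false, Bool.false_eq_true, hdrop, hk, List.take_succ_cons,
      List.getD_eq_getElem?_getD, List.getElem?_eq_getElem hlo, Option.getD_some]
  · have hm : hi - 1 < xs.length := by omega
    have hk : hi - lo = (hi - 1 - lo) + 1 := by omega
    have hidx : lo + (hi - 1 - lo) = hi - 1 := by omega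
    have hm2 : hi - 1 - lo < (xs.drop lo).length := by simp; omega
    simp only [pvView, if_true, List.take_add_one, hk]
    rw [List.getElem?_eq_getElem hm2]
    simp [List.getElem_drop, hidx, List.getD_eq_getElem?_getD, List.getElem?_eq_getElem hm]

theorem loop_eq (A B : List Char) : ∀ (n alo ahi blo bhi : Nat) (rev : Bool),
    (ahi - alo) + (bhi - blo) ≤ n →
    alo < ahi → ahi ≤ A.length → blo < bhi → bhi ≤ B.length →
    esm2Loop (pvView A alo ahi rev) (pvView B blo bhi rev) = esm2AltLoop A B alo ahi blo bhi rev := by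
  intro n
  induction n with
  | zero => intro alo ahi blo bhi rev hn h1 h2 h3 h4; omega
  | succ n ih =>
    intro alo ahi blo bhi rev hn h1 h2 h3 h4
    set ca := if rev then A.getD (ahi - 1) ' ' else A.getD alo ' ' with hca
    set cb := if rev then B.getD (bhi - 1) ' ' else B.getD blo ' ' with hcb
    set alo' := if rev then alo else alo + 1 with halo'
    set ahi' := if rev then ahi - 1 else ahi with hahi'
    set blo' := if rev then blo else blo + 1 with hblo'
    set bhi' := if rev then bhi - 1 else bhi with hbhi'
    have hA : pvView A alo ahi rev = ca :: pvView A alo' ahi' rev := pvView_cons A alo ahi rev h1 h2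
    have hB : pvView B blo bhi rev = cb :: pvView B blo' bhi' rev := pvView_cons B blo bhi rev h3 h4
    have hao : alo' ≤ ahi' ∧ ahi' ≤ A.length ∧ ahi' - alo' + 1 = ahi - alo := by
      cases rev <;> simp [halo', hahi'] <;> omega
    have hbo : blo' ≤ bhi' ∧ bhi' ≤ B.length ∧ bhi' - blo' + 1 = bhi - blo := by
      cases rev <;> simp [hblo', hbhi'] <;> omega
    have hAnil : (pvView A alo' ahi' rev = []) ↔ alo' = ahi' :=
      pvView_eq_nil_iff A alo' ahi' rev hao.1 hao.2.1
    have hBnil : (pvView B blo' bhi' rev = []) ↔ blo' = bhi' :=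
      pvView_eq_nil_iff B blo' bhi' rev hbo.1 hbo.2.1
    rw [hA, hB, esm2Loop, esm2AltLoop]
    rw [if_pos (show alo < ahi ∧ blo < bhi from ⟨h1, h3⟩)]
    simp only [← hca, ← hcb, ← halo', ← hahi', ← hblo', ← hbhi']
    by_cases hlt : ca < cb
    · rw [if_pos hlt, if_pos hlt]
      by_cases hz : alo' = ahi'
      · rw [if_pos (hAnil.mpr hz), if_pos hz, hB]
      · rw [if_neg (fun h => hz (hAnil.mp h)), if_neg hz, ← hB, pvView_reverse, pvView_reverse]
        exact ih alo' ahi' blo bhi (!rev) (by omega) (by omega) hao.2.1 h3 h4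
    · rw [if_neg hlt, if_neg hlt]
      by_cases hgt : cb < ca
      · rw [if_pos hgt, if_pos hgt]
        by_cases hz : blo' = bhi'
        · rw [if_pos (hBnil.mpr hz), if_pos hz, hA]
        · rw [if_neg (fun h => hz (hBnil.mp h)), if_neg hz, ← hA, pvView_reverse, pvView_reverse]
          exact ih alo ahi blo' bhi' (!rev) (by omega) h1 h2 (by omega) hbo.2.1
      · rw [if_neg hgt, if_neg hgt]
        by_cases hz : alo' = ahi' ∧ blo' = bhi'
        · rw [if_pos ⟨hAnil.mpr hz.1, hBnil.mpr hz.2⟩, if_pos hz]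
        · rw [if_neg (fun h => hz ⟨hAnil.mp h.1, hBnil.mp h.2⟩), if_neg hz]
          by_cases hza : alo' = ahi'
          · rw [if_pos (hAnil.mpr hza), if_pos hza]
          · rw [if_neg (fun h => hza (hAnil.mp h)), if_neg hza]
            by_cases hzb : blo' = bhi'
            · rw [if_pos (hBnil.mpr hzb), if_pos hzb]
            · rw [if_neg (fun h => hzb (hBnil.mp h)), if_neg hzb,
                pvView_reverse, pvView_reverse]
              exact ih alo' ahi' blo' bhi' (!rev) (by omega) (by omega) hao.2.1 (by omega) hbo.2.1

-- ===== VERDICT (by name: the statement is the Claim_ definition above) =====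
theorem esm2_spec : Claim_equal_esm2 := by
  intro first second _ hpre
  have hf : first.toList ≠ [] := fun h => hpre.1 (String.toList_eq_nil_iff.mp h)
  have hs : second.toList ≠ [] := fun h => hpre.2 (String.toList_eq_nil_iff.mp h)
  have hf' : 0 < first.toList.length := List.length_pos_of_ne_nil hf
  have hs' : 0 < second.toList.length := List.length_pos_of_ne_nil hs
  have hv : ∀ (xs : List Char), pvView xs 0 xs.length false = xs := by
    intro xs
    simp only [pvView, List.drop_zero, Nat.sub_zero, List.take_length, Bool.false_eq_true,
      if_false]
  unfold Spec_esm2 esm2 esm2_alt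
  rw [← loop_eq first.toList second.toList (first.toList.length + second.toList.length)
      0 first.toList.length 0 second.toList.length false (by omega) hf' le_rfl hs' le_rfl,
    hv, hv]
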